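-- pv_equiv track=rewrite | github.com/mazmazz/SkepticSystem | python/skepticsys/preprocessors/delta_transformer.py | _gen_range
-- ===== SOURCE A (Python) =====
-- def _gen_range(start, stop, step, fixed_start=False, remainder=True):
--     # detect reverse range, and enforce step sign
--     is_reverse = stop < start
--
--     # fill in step if 0
--     if step is None or step == 0:
--         step = (stop-abs(start)) if not is_reverse else -(stop-abs(start))
--
--     if (is_reverse and step > 0) or (not is_reverse and step < 0):
--         step = -step
--
--     # https://stackoverflow.com/questions/14048728/generate-list-of-range-tuples-with-given-boundaries-in-python
--     current = next_current = start
--     while (next_current < stop) if not is_reverse else (next_current > stop):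
--         next_current = next_current + step
--         if (next_current < stop) if not is_reverse else (next_current > stop):
--             yield (current, next_current)
--         elif remainder: # elif remainder and stop-1 > next_current-step:
--             yield (current, stop) # yield (current, stop-1)
--         else:
--             break
--         if not fixed_start: current = next_current
-- ===== SOURCE B (Python) =====
-- def _gen_range(start, stop, step, fixed_start=False, remainder=True):
--     # same guards as the task requires: detect direction, fill step, enforce sign
--     is_reverse = stop < start
--     if step is None or step == 0:
--         step = (stop-abs(start)) if not is_reverse else -(stop-abs(start))
--     step = -abs(step) if is_reverse else abs(step)
--
--     # closed form: number of boundary points strictly before stop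
--     d = abs(stop - start)
--     count = 0 if d == 0 else -(-d // abs(step))  # ceil(d/|step|)
--
--     for i in range(count - 1):
--         yield ((start if fixed_start else start + i*step), start + (i+1)*step)
--     if count > 0 and remainder:
--         yield ((start if fixed_start else start + (count-1)*step), stop)
-- ===== Notes on version B (the rewrite author's own statement) =====
-- stated objective: alternative
-- what changed: A's streaming while-loop that steps, yields and tracks current is replaced by a closed form: compute count = ceil(|stop-start|/|step|) by integer division once, then emit the i-th tuple directly as (start [+ i*step], start+(i+1)*step) over range(count-1) plus a final clamped (.., stop) tuple when remainder; Pre_ only excludes inputs with effective step 0 where A's loop never terminates (B would raise ZeroDivisionError there).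
import Mathlib
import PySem

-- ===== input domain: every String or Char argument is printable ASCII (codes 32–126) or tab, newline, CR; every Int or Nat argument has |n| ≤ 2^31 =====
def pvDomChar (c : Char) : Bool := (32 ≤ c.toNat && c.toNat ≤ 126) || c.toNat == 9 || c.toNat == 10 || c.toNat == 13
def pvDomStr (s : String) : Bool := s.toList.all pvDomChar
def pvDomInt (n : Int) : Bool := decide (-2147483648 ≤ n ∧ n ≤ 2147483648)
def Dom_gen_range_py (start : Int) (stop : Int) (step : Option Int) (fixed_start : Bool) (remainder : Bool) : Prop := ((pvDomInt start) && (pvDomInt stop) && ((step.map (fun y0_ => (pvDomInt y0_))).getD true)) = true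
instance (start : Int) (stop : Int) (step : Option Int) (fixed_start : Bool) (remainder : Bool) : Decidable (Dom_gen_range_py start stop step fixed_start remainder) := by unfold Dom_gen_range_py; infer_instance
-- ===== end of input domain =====

-- B replaces A's streaming while-loop by a closed form (ceiling-division count, tuples by index);
-- return-value equivalence only (both Pythons are generators).

-- ===== PORT A =====
-- the loop condition '(x < stop) if not is_reverse else (x > stop)'
def pvBefore (stop : Int) (is_reverse : Bool) (x : Int) : Bool :=
  if is_reverse then decide (stop < x) else decide (x < stop)

-- the while-loop of _gen_range; fuel ((stop-start).natAbs+1) only makes it total,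
-- Pre_ excludes the inputs where the Python loop never terminates
def genA_loop (stop step : Int) (is_reverse fixed_start remainder : Bool)
    (current next_current : Int) : Nat → List (Int × Int)
  | 0 => []
  | fuel + 1 =>
    if pvBefore stop is_reverse next_current then
      let nc := next_current + step
      if pvBefore stop is_reverse nc then
        (current, nc) :: genA_loop stop step is_reverse fixed_start remainder
          (if fixed_start then current else nc) nc fuel
      else if remainder then
        (current, stop) :: genA_loop stop step is_reverse fixed_start remainder
          (if fixed_start then current else nc) nc fuel
      else []
    else []

def gen_range_py (start : Int) (stop : Int) (step : Option Int) (fixed_start : Bool) (remainder : Bool) : List (Int × Int) :=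
  let is_reverse : Bool := decide (stop < start)
  let step1 : Int :=
    if step = none ∨ step = some 0 then
      if !is_reverse then stop - |start| else -(stop - |start|)
    else step.getD 0
  let step2 : Int :=
    if (is_reverse && decide (step1 > 0)) || (!is_reverse && decide (step1 < 0)) then -step1 else step1
  genA_loop stop step2 is_reverse fixed_start remainder start start ((stop - start).natAbs + 1)

-- ===== PORT B =====
def gen_range_py_alt (start : Int) (stop : Int) (step : Option Int) (fixed_start : Bool) (remainder : Bool) : List (Int × Int) :=
  let is_reverse : Bool := decide (stop < start)
  let step1 : Int :=
    if step = none ∨ step = some 0 then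
      if !is_reverse then stop - |start| else -(stop - |start|)
    else step.getD 0
  let step2 : Int := if is_reverse then -|step1| else |step1|
  let d : Int := |stop - start|
  -- count = ceil(d / |step|), Python's '-(-d // abs(step))' (ZeroDivisionError when d ≠ 0 and step2 = 0 is outside Pre_)
  let count : Int := if d = 0 then 0 else -(PySem.Int.floordiv (-d) |step2|)
  ((PySem.List.pyRange 0 (count - 1) 1).map
      (fun i => ((if fixed_start then start else start + i * step2), start + (i + 1) * step2)))
    ++ (if decide (count > 0) && remainder then
          [((if fixed_start then start else start + (count - 1) * step2), stop)] else [])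

-- ===== PRECONDITION & SPEC =====
-- Pre_ excludes exactly the inputs on which the effective step is 0 while the range is nonempty:
-- there Python's _gen_range is an infinite generator, never returning (and B raises ZeroDivisionError).
def Pre_gen_range_py (start : Int) (stop : Int) (step : Option Int) (fixed_start : Bool) (remainder : Bool) : Prop :=
  ¬ ((step = none ∨ step = some 0) ∧ stop = |start| ∧ start ≠ stop)
instance (start : Int) (stop : Int) (step : Option Int) (fixed_start : Bool) (remainder : Bool) : Decidable (Pre_gen_range_py start stop step fixed_start remainder) := by unfold Pre_gen_range_py; infer_instance

def pvWitness_gen_range_py : Int × Int × Option Int × Bool × Bool := (0, 6, some 2, false, true)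

def Spec_gen_range_py (start : Int) (stop : Int) (step : Option Int) (fixed_start : Bool) (remainder : Bool) (out : List (Int × Int)) : Prop := out = gen_range_py_alt start stop step fixed_start remainder
instance (start : Int) (stop : Int) (step : Option Int) (fixed_start : Bool) (remainder : Bool) (out : List (Int × Int)) : Decidable (Spec_gen_range_py start stop step fixed_start remainder out) := by unfold Spec_gen_range_py; infer_instance

-- ===== CLAIM (what is proved, stated in full; the proofs are below) =====
def Claim_equal_gen_range_py : Prop := ∀ (start : Int) (stop : Int) (step : Option Int) (fixed_start : Bool) (remainder : Bool), Dom_gen_range_py start stop step fixed_start remainder → Pre_gen_range_py start stop step fixed_start remainder → Spec_gen_range_py start stop step fixed_start remainder (gen_range_py start stop step fixed_start remainder)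

-- ===== LEMMAS AND PROOFS =====

-- signed distance to stop and remaining-point count (proof-side helpers)
def pvDD (stop : Int) (is_reverse : Bool) (p : Int) : Int :=
  if is_reverse then p - stop else stop - p

def pvCnt (stop : Int) (is_reverse : Bool) (s p : Int) : Int :=
  if pvDD stop is_reverse p ≤ 0 then 0 else -(PySem.Int.floordiv (-(pvDD stop is_reverse p)) s)

lemma pvBefore_iff (stop : Int) (ir : Bool) (p : Int) :
    pvBefore stop ir p = true ↔ 0 < pvDD stop ir p := by
  cases ir <;> simp [pvBefore, pvDD] <;> omega

-- counting facts, for s ≥ 1 and step = (if ir then -s else s)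
lemma cnt_zero (stop : Int) (ir : Bool) (s p : Int)
    (h : pvBefore stop ir p = false) : pvCnt stop ir s p = 0 := by
  have h1 : ¬ (0 < pvDD stop ir p) := by rw [← pvBefore_iff, h]; simp
  unfold pvCnt
  rw [if_pos (by omega : pvDD stop ir p ≤ 0)]

lemma dd_step (stop : Int) (ir : Bool) (s p : Int) :
    pvDD stop ir (p + (if ir then -s else s)) = pvDD stop ir p - s := by
  cases ir <;> simp [pvDD] <;> ring

lemma cnt_one (stop : Int) (ir : Bool) (s p : Int) (hs : 1 ≤ s)
    (h1 : pvBefore stop ir p = true)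
    (h2 : pvBefore stop ir (p + (if ir then -s else s)) = false) :
    pvCnt stop ir s p = 1 := by
  have hd1 : 0 < pvDD stop ir p := (pvBefore_iff _ _ _).mp h1
  have hd2 : ¬ (0 < pvDD stop ir (p + (if ir then -s else s))) := by
    rw [← pvBefore_iff, h2]; simp
  rw [dd_step] at hd2
  simp only [pvCnt, if_neg (by omega : ¬ pvDD stop ir p ≤ 0)]
  rw [PySem.Int.neg_floordiv_neg_eq_iff_of_pos (by omega)]
  constructor <;> nlinarith [hd1, hd2]

lemma cnt_succ (stop : Int) (ir : Bool) (s p : Int) (hs : 1 ≤ s)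
    (h2 : pvBefore stop ir (p + (if ir then -s else s)) = true) :
    pvCnt stop ir s p = pvCnt stop ir s (p + (if ir then -s else s)) + 1 := by
  have hd2 : 0 < pvDD stop ir (p + (if ir then -s else s)) := (pvBefore_iff _ _ _).mp h2
  rw [dd_step] at hd2
  have hd1 : 0 < pvDD stop ir p := by omega
  set d := pvDD stop ir p with hd
  simp only [pvCnt, dd_step, ← hd, if_neg (by omega : ¬ d ≤ 0),
    if_neg (by omega : ¬ d - s ≤ 0)]
  set q := -(PySem.Int.floordiv (-(d - s)) s) with hq
  have hqc : (q - 1) * s < d - s ∧ d - s ≤ q * s := by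
    rw [← PySem.Int.neg_floordiv_neg_eq_iff_of_pos (by omega : (0:Int) < s)]
  rw [PySem.Int.neg_floordiv_neg_eq_iff_of_pos (by omega : (0:Int) < s)]
  constructor <;> nlinarith [hqc.1, hqc.2]

lemma cnt_pos (stop : Int) (ir : Bool) (s p : Int) (hs : 1 ≤ s)
    (h1 : pvBefore stop ir p = true) : 1 ≤ pvCnt stop ir s p := by
  by_cases h2 : pvBefore stop ir (p + (if ir then -s else s)) = true
  · rw [cnt_succ stop ir s p hs h2]
    have hd : 0 < pvDD stop ir (p + (if ir then -s else s)) := (pvBefore_iff _ _ _).mp h2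
    rw [dd_step] at hd
    simp only [pvCnt, dd_step, if_neg (by omega : ¬ pvDD stop ir p - s ≤ 0)]
    have hqc := (PySem.Int.neg_floordiv_neg_eq_iff_of_pos (a := pvDD stop ir p - s)
      (b := s) (q := -(PySem.Int.floordiv (-(pvDD stop ir p - s)) s)) (by omega)).mp rfl
    nlinarith [hqc.1, hqc.2]
  · rw [cnt_one stop ir s p hs h1 (by simpa using h2)]

-- shape lemmas for A's loop
lemma genA_loop_nil (stop step : Int) (ir fs rem : Bool) (cur p : Int) (fuel : Nat)
    (h : pvBefore stop ir p = false) :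
    genA_loop stop step ir fs rem cur p fuel = [] := by
  cases fuel <;> simp [genA_loop, h]

lemma genA_loop_cons (stop step : Int) (ir fs rem : Bool) (cur p : Int) (f : Nat)
    (hc : pvBefore stop ir p = true) (hc2 : pvBefore stop ir (p + step) = true) :
    genA_loop stop step ir fs rem cur p (f + 1) =
      (cur, p + step) :: genA_loop stop step ir fs rem (if fs then cur else p + step) (p + step) f := by
  simp [genA_loop, hc, hc2]

lemma genA_loop_last (stop step : Int) (ir fs rem : Bool) (cur p : Int) (f : Nat)
    (hc : pvBefore stop ir p = true) (hc2 : pvBefore stop ir (p + step) = false) :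
    genA_loop stop step ir fs rem cur p (f + 1) = if rem then [(cur, stop)] else [] := by
  cases rem with
  | false => simp [genA_loop, hc, hc2]
  | true =>
    simp only [genA_loop, hc, if_true, hc2, Bool.false_eq_true, if_false]
    rw [genA_loop_nil stop step ir fs true (if fs then cur else p + step) (p + step) f hc2]

-- the closed-form emission B computes, at an arbitrary point p with count c
def pvClosed (stop stepv : Int) (fs rem : Bool) (fixc p c : Int) : List (Int × Int) :=
  ((PySem.List.pyRange 0 (c - 1) 1).map
      (fun i => ((if fs then fixc else p + i * stepv), p + (i + 1) * stepv)))
    ++ (if decide (c > 0) && rem then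
          [((if fs then fixc else p + (c - 1) * stepv), stop)] else [])

lemma closed_zero (stop st : Int) (fs rem : Bool) (cur p : Int) :
    pvClosed stop st fs rem cur p 0 = [] := by
  simp [pvClosed, PySem.List.pyRange_one_eq_nil (show (0:Int) - 1 ≤ 0 by norm_num)]

lemma closed_one (stop st : Int) (fs rem : Bool) (cur p : Int) :
    pvClosed stop st fs rem cur p 1 = if rem then [((if fs then cur else p), stop)] else [] := by
  have h1 : PySem.List.pyRange 0 ((1:Int) - 1) 1 = [] :=
    PySem.List.pyRange_one_eq_nil (by norm_num)
  cases rem <;> cases fs <;>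
    simp [pvClosed, h1, show p + ((1:Int) - 1) * st = p by ring]

lemma closed_step (stop st : Int) (rem : Bool) (p c : Int) (hc : 1 ≤ c) :
    pvClosed stop st false rem p p (c + 1)
      = (p, p + st) :: pvClosed stop st false rem (p + st) (p + st) c := by
  have hrc : PySem.List.pyRange 0 (c + 1 - 1) 1 = 0 :: PySem.List.pyRange 1 (c + 1 - 1) 1 :=
    PySem.List.pyRange_one_cons (by omega)
  have hshift : PySem.List.pyRange 1 (c + 1 - 1) 1
      = (PySem.List.pyRange 0 (c - 1) 1).map (fun j => j + 1) := by
    rw [PySem.List.pyRange_one, PySem.List.pyRange_one, List.map_map]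
    rw [show c + 1 - 1 - 1 = c - 1 - 0 by ring]
    refine List.map_congr_left (fun k _ => ?_)
    simp only [Function.comp_apply]
    ring
  have hmap : ((PySem.List.pyRange 0 (c - 1) 1).map (fun j => j + 1)).map
        (fun i => ((p + i * st : Int), p + (i + 1) * st))
      = (PySem.List.pyRange 0 (c - 1) 1).map
        (fun j => (((p + st) + j * st : Int), (p + st) + (j + 1) * st)) := by
    rw [List.map_map]
    refine List.map_congr_left (fun k _ => ?_)
    simp only [Function.comp_apply]
    exact congrArg₂ Prod.mk (by ring) (by ring)
  have h1 : (decide ((c : Int) + 1 > 0)) = true := by simp; omega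
  have h2 : (decide ((c : Int) > 0)) = true := by simp; omega
  simp only [pvClosed, Bool.false_eq_true, if_false, hrc, List.map_cons, hshift, hmap,
    h1, h2, Bool.true_and, List.cons_append]
  congr 1
  · exact congrArg₂ Prod.mk (by ring) (by ring)
  · congr 1
    cases rem with
    | false => rfl
    | true =>
      simp only [if_true]
      exact congrArg (fun x => [x]) (congrArg₂ Prod.mk (by ring) rfl)

lemma closed_step_fix (stop st : Int) (rem : Bool) (cur p c : Int) (hc : 1 ≤ c) :
    pvClosed stop st true rem cur p (c + 1)
      = (cur, p + st) :: pvClosed stop st true rem cur (p + st) c := by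
  have hrc : PySem.List.pyRange 0 (c + 1 - 1) 1 = 0 :: PySem.List.pyRange 1 (c + 1 - 1) 1 :=
    PySem.List.pyRange_one_cons (by omega)
  have hshift : PySem.List.pyRange 1 (c + 1 - 1) 1
      = (PySem.List.pyRange 0 (c - 1) 1).map (fun j => j + 1) := by
    rw [PySem.List.pyRange_one, PySem.List.pyRange_one, List.map_map]
    rw [show c + 1 - 1 - 1 = c - 1 - 0 by ring]
    refine List.map_congr_left (fun k _ => ?_)
    simp only [Function.comp_apply]
    ring
  have hmap : ((PySem.List.pyRange 0 (c - 1) 1).map (fun j => j + 1)).map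
        (fun i => ((cur : Int), p + (i + 1) * st))
      = (PySem.List.pyRange 0 (c - 1) 1).map
        (fun j => ((cur : Int), (p + st) + (j + 1) * st)) := by
    rw [List.map_map]
    refine List.map_congr_left (fun k _ => ?_)
    simp only [Function.comp_apply]
    exact congrArg₂ Prod.mk rfl (by ring)
  have h1 : (decide ((c : Int) + 1 > 0)) = true := by simp; omega
  have h2 : (decide ((c : Int) > 0)) = true := by simp; omega
  simp only [pvClosed, if_true, hrc, List.map_cons, hshift, hmap,
    h1, h2, Bool.true_and, List.cons_append]
  congr 1
  · exact congrArg₂ Prod.mk rfl (by ring)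

-- main invariant: A's loop at point p equals the closed form with count pvCnt
lemma core (stop s : Int) (ir fs rem : Bool) (hs : 1 ≤ s) :
    ∀ (fuel : Nat) (cur p : Int),
      (fs = false → cur = p) →
      pvBefore stop ir (p + (fuel : Int) * (if ir then -s else s)) = false →
      genA_loop stop (if ir then -s else s) ir fs rem cur p fuel =
        pvClosed stop (if ir then -s else s) fs rem cur p (pvCnt stop ir s p) := by
  intro fuel
  induction fuel with
  | zero =>
    intro cur p _ H
    simp only [Nat.cast_zero, zero_mul, add_zero] at H
    rw [cnt_zero stop ir s p H, closed_zero]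
    exact genA_loop_nil _ _ _ _ _ _ _ _ H
  | succ f ih =>
    intro cur p hcur H
    have Hnext : pvBefore stop ir
        ((p + (if ir then -s else s)) + (f : Int) * (if ir then -s else s)) = false := by
      have he : (p + (if ir then -s else s)) + (f : Int) * (if ir then -s else s)
          = p + ((f + 1 : Nat) : Int) * (if ir then -s else s) := by push_cast; ring
      rw [he]; exact H
    by_cases hc : pvBefore stop ir p = true
    · by_cases hc2 : pvBefore stop ir (p + (if ir then -s else s)) = true
      · have hcnt := cnt_succ stop ir s p hs hc2
        have hc1 := cnt_pos stop ir s (p + (if ir then -s else s)) hs hc2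
        rw [genA_loop_cons _ _ _ _ _ _ _ _ hc hc2, hcnt]
        cases fs with
        | false =>
          have hp : cur = p := hcur rfl
          subst hp
          rw [closed_step stop _ rem cur _ hc1]
          simp only [Bool.false_eq_true, if_false]
          exact congrArg _ (ih _ _ (fun _ => rfl) Hnext)
        | true =>
          rw [closed_step_fix stop _ rem cur p _ hc1]
          simp only [if_true]
          exact congrArg _ (ih cur _ (fun h => nomatch h) Hnext)
      · have hc2' : pvBefore stop ir (p + (if ir then -s else s)) = false := by simpa using hc2
        rw [genA_loop_last _ _ _ _ _ _ _ _ hc hc2', cnt_one stop ir s p hs hc hc2', closed_one]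
        cases fs with
        | false => simp [hcur rfl]
        | true => simp
    · have hc' : pvBefore stop ir p = false := by simpa using hc
      rw [cnt_zero stop ir s p hc', closed_zero]
      exact genA_loop_nil _ _ _ _ _ _ _ _ hc'

-- fuel bound: the chain is exhausted within (stop-start).natAbs + 1 iterations
lemma fuel_enough (start stop S : Int)
    (hs : if stop < start then S ≤ -1 else 1 ≤ S) :
    pvBefore stop (decide (stop < start)) (start + (((stop - start).natAbs + 1 : Nat) : Int) * S) = false := by
  by_cases hr : stop < start
  · have hS : S ≤ -1 := by simpa [hr] using hs
    have hf : (((stop - start).natAbs + 1 : Nat) : Int) = start - stop + 1 := by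
      have : (stop - start).natAbs = (start - stop).toNat := by omega
      push_cast [this]; omega
    have hnn : (0:Int) ≤ start - stop + 1 := by omega
    have hmul : (start - stop + 1) * S ≤ (start - stop + 1) * (-1) :=
      mul_le_mul_of_nonneg_left hS hnn
    rw [hf]
    simp only [pvBefore, hr, decide_true, if_true, decide_eq_false_iff_not, not_lt]
    linarith [hmul]
  · have hS : 1 ≤ S := by simpa [hr] using hs
    have hf : (((stop - start).natAbs + 1 : Nat) : Int) = stop - start + 1 := by
      have : (stop - start).natAbs = (stop - start).toNat := by omega
      push_cast [this]; omega
    have hnn : (0:Int) ≤ stop - start + 1 := by omega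
    have hmul : (stop - start + 1) * 1 ≤ (stop - start + 1) * S :=
      mul_le_mul_of_nonneg_left hS hnn
    rw [hf]
    simp only [pvBefore, hr, decide_false, Bool.false_eq_true, if_false,
      decide_eq_false_iff_not, not_lt]
    linarith [hmul]

-- the fill-in step and both ports' effective steps, as named defs (rfl-equal to the lets)
def pvStep1 (start stop : Int) (step : Option Int) : Int :=
  if step = none ∨ step = some 0 then
    if !(decide (stop < start)) then stop - |start| else -(stop - |start|)
  else step.getD 0

def pvStep2A (start stop : Int) (step : Option Int) : Int :=
  if (decide (stop < start) && decide (pvStep1 start stop step > 0))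
      || (!(decide (stop < start)) && decide (pvStep1 start stop step < 0))
    then -(pvStep1 start stop step) else pvStep1 start stop step

def pvStep2B (start stop : Int) (step : Option Int) : Int :=
  if decide (stop < start) then -|pvStep1 start stop step| else |pvStep1 start stop step|

def pvCntB (start stop : Int) (step : Option Int) : Int :=
  if |stop - start| = 0 then 0
  else -(PySem.Int.floordiv (-|stop - start|) |pvStep2B start stop step|)

lemma genA_eq (start stop : Int) (step : Option Int) (fs rem : Bool) :
    gen_range_py start stop step fs rem
      = genA_loop stop (pvStep2A start stop step) (decide (stop < start)) fs rem start start
          ((stop - start).natAbs + 1) := rfl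

lemma genB_eq (start stop : Int) (step : Option Int) (fs rem : Bool) :
    gen_range_py_alt start stop step fs rem
      = pvClosed stop (pvStep2B start stop step) fs rem start start (pvCntB start stop step) := rfl

-- B's '-abs(step) if is_reverse else abs(step)' equals A's conditional sign flip
lemma flip_abs (ir : Bool) (x : Int) :
    (if ir then -|x| else |x|)
      = (if (ir && decide (x > 0)) || (!ir && decide (x < 0)) then -x else x) := by
  rcases lt_trichotomy x 0 with h | h | h
  · cases ir <;> simp [abs_of_neg h] <;> omega
  · cases ir <;> simp [h]
  · cases ir <;> simp [abs_of_pos h] <;> omega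

lemma stepBA (start stop : Int) (step : Option Int) :
    pvStep2B start stop step = pvStep2A start stop step := by
  unfold pvStep2B pvStep2A
  exact flip_abs _ _

-- Pre_ guarantees the effective step is nonzero with the right sign (or start = stop)
lemma step2_cases (start stop : Int) (step : Option Int)
    (hpre : ¬ ((step = none ∨ step = some 0) ∧ stop = |start| ∧ start ≠ stop)) :
    (start = stop ∧ pvStep2A start stop step = 0) ∨
      (if stop < start then pvStep2A start stop step ≤ -1 else 1 ≤ pvStep2A start stop step) := by
  unfold pvStep2A pvStep1
  by_cases hfill : step = none ∨ step = some 0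
  · rw [if_pos hfill]
    by_cases heq : start = stop
    · by_cases hz : stop = |start|
      · left
        refine ⟨heq, ?_⟩
        split_ifs <;>
          rcases abs_choice start with habs | habs <;>
          simp only [Bool.or_eq_true, Bool.and_eq_true, Bool.not_eq_true',
            decide_eq_true_eq, decide_eq_false_iff_not] at * <;>
          omega
      · right
        split_ifs <;>
          rcases abs_choice start with habs | habs <;>
          simp only [Bool.or_eq_true, Bool.and_eq_true, Bool.not_eq_true',
            decide_eq_true_eq, decide_eq_false_iff_not] at * <;>
          omega
    · have hz : stop ≠ |start| := fun h => hpre ⟨hfill, h, heq⟩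
      right
      split_ifs <;>
        rcases abs_choice start with habs | habs <;>
        simp only [Bool.or_eq_true, Bool.and_eq_true, Bool.not_eq_true',
          decide_eq_true_eq, decide_eq_false_iff_not] at * <;>
        omega
  · obtain ⟨v, hv⟩ : (∃ v, step = some v) := by
      cases step with
      | none => exact absurd (Or.inl rfl) hfill
      | some v => exact ⟨v, rfl⟩
    subst hv
    have hs0 : v ≠ 0 := by
      intro h; exact hfill (Or.inr (by rw [h]))
    right
    rw [if_neg hfill]
    simp only [Option.getD_some]
    split_ifs <;>
      simp only [Bool.or_eq_true, Bool.and_eq_true, Bool.not_eq_true',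
        decide_eq_true_eq, decide_eq_false_iff_not] at * <;>
      omega

-- B's count equals the invariant count at the start point
lemma cntB_eq (start stop : Int) (step : Option Int) :
    pvCntB start stop step
      = pvCnt stop (decide (stop < start)) |pvStep2A start stop step| start := by
  have hdd : pvDD stop (decide (stop < start)) start = |stop - start| := by
    by_cases hr : stop < start
    · simp only [pvDD, hr, decide_true, if_true]
      rw [abs_sub_comm, abs_of_pos (by omega : (0:Int) < start - stop)]
    · simp only [pvDD, hr, decide_false, Bool.false_eq_true, if_false]
      rw [abs_of_nonneg (by omega : (0:Int) ≤ stop - start)]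
  unfold pvCntB pvCnt
  rw [stepBA, hdd]
  rcases eq_or_ne |stop - start| 0 with h0 | h0
  · simp [h0]
  · have hle : ¬ |stop - start| ≤ 0 := by
      have := abs_nonneg (stop - start); omega
    simp [h0, hle]

-- ===== VERDICT (by name: the statement is the Claim_ definition above) =====
theorem gen_range_py_spec : Claim_equal_gen_range_py := by
  intro start stop step fs rem _ hpre
  unfold Spec_gen_range_py
  rw [genA_eq, genB_eq, cntB_eq, stepBA]
  rcases step2_cases start stop step hpre with ⟨heq, _⟩ | hsgn
  · subst heq
    have hb : pvBefore start (decide (start < start)) start = false := by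
      simp [pvBefore]
    rw [cnt_zero _ _ _ _ hb, closed_zero]
    exact genA_loop_nil _ _ _ _ _ _ _ _ hb
  · set ir := decide (stop < start) with hir
    set S := pvStep2A start stop step with hS
    have hs1 : 1 ≤ |S| := by
      by_cases hr : stop < start <;> simp [hr] at hsgn <;>
        rcases abs_cases S with h | h <;> omega
    have hstep : S = if ir then -|S| else |S| := by
      by_cases hr : stop < start <;> simp [hr, hir] at hsgn ⊢ <;>
        rcases abs_cases S with h | h <;> omega
    have hfe : pvBefore stop ir (start + (((stop - start).natAbs + 1 : Nat) : Int) * S) = false := by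
      rw [hir]; exact fuel_enough start stop S hsgn
    calc genA_loop stop S ir fs rem start start ((stop - start).natAbs + 1)
        = genA_loop stop (if ir then -|S| else |S|) ir fs rem start start
            ((stop - start).natAbs + 1) := by rw [← hstep]
      _ = pvClosed stop (if ir then -|S| else |S|) fs rem start start (pvCnt stop ir |S| start) :=
          core stop |S| ir fs rem hs1 _ start start (fun _ => rfl) (by rw [← hstep]; exact hfe)
      _ = pvClosed stop S fs rem start start (pvCnt stop ir |S| start) := by rw [← hstep]
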